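-- pv_equiv track=rewrite | github.com/Marcus305/Trabalho-PAI-2 | Sobel/sobel-edge-detection.py | process_chunk
-- ===== SOURCE A (Python) =====
-- def process_chunk(args):
--     image, width, start_row, end_row = args
--     sobel_chunk = [[0] * width for _ in range(end_row - start_row)]
--
--     for r in range(max(1, start_row), min(end_row, len(image)-1)):
--         for c in range(1, width-1):
--             # Cálculo direto de Gx e Gy
--             gx = (image[r-1][c+1] + 2*image[r][c+1] + image[r+1][c+1]) - \
--                  (image[r-1][c-1] + 2*image[r][c-1] + image[r+1][c-1])
--
--             gy = (image[r-1][c-1] + 2*image[r-1][c] + image[r-1][c+1]) - \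
--                  (image[r+1][c-1] + 2*image[r+1][c] + image[r+1][c+1])
--
--             magnitude = abs(gx) + abs(gy)
--             sobel_chunk[r - start_row][c] = magnitude
--
--     return start_row, end_row, sobel_chunk
-- ===== SOURCE B (Python) =====
-- def process_chunk(args):
--     # Separable Sobel: precompute vertically-smoothed columns (vcol) and
--     # horizontally-smoothed rows (hrow), then combine; rows are built whole.
--     image, width, start_row, end_row = args
--     lo = max(1, start_row)
--     hi = min(end_row, len(image) - 1)
--     if width >= 3 and lo < hi:
--         vcol = [[image[r-1][c] + 2*image[r][c] + image[r+1][c]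
--                  for c in range(width)]
--                 for r in range(lo, hi)]
--         hrow = [[image[i][c-1] + 2*image[i][c] + image[i][c+1]
--                  for c in range(1, width-1)]
--                 for i in range(lo-1, hi+1)]
--         sobel = [[0] + [abs(vcol[r-lo][c+1] - vcol[r-lo][c-1])
--                         + abs(hrow[r-lo][c-1] - hrow[r-lo+2][c-1])
--                         for c in range(1, width-1)] + [0]
--                  if lo <= r < hi else [0]*width
--                  for r in range(start_row, end_row)]
--     else:
--         sobel = [[0]*width for _ in range(end_row - start_row)]
--     return start_row, end_row, sobel
-- ===== Notes on version B (the rewrite author's own statement) =====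
-- stated objective: alternative
-- what changed: B computes the Sobel magnitude via a separable decomposition - precomputed vertically-smoothed column sums (vcol) and horizontally-smoothed row sums (hrow) combined per pixel - and builds each output row whole as [0]+interior+[0] instead of writing cells into a mutated zero matrix.
import Mathlib
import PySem

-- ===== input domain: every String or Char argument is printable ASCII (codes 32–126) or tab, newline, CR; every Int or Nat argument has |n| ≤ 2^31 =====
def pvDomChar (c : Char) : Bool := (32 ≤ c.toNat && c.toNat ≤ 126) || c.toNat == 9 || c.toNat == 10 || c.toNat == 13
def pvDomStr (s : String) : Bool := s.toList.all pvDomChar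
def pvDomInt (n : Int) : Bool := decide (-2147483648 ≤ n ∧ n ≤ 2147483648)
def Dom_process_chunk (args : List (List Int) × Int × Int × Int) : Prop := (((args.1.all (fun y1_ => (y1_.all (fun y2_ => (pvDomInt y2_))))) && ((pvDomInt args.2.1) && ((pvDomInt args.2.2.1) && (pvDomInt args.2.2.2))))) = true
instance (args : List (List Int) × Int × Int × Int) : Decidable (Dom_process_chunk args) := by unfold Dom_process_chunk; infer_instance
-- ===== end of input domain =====

-- B replaces the per-pixel 6-term Gx/Gy sums by two separable smoothed tables
-- (vcol/hrow) combined per pixel, and builds each output row whole instead of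
-- mutating a zero matrix (objective: alternative decomposition, same cost).

-- 2-D indexing t[i][j] with defaults (image pixels in both ports, table lookups in B;
-- in range wherever the loops reach)
def pvPxl (image : List (List Int)) (i j : Int) : Int :=
  PySem.List.pyGetD (PySem.List.pyGetD image i []) j 0

-- ===== PORT A =====
def process_chunk (args : List (List Int) × Int × Int × Int) : Int × Int × List (List Int) :=
  match args with
  | (image, width, start_row, end_row) =>
    let sobel0 : List (List Int) :=
      (PySem.List.pyRange 0 (end_row - start_row) 1).map
        (fun _ => PySem.List.pyRepeat [(0 : Int)] width)
    let sobel :=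
      (PySem.List.pyRange (max 1 start_row) (min end_row (PySem.List.len image - 1)) 1).foldl
        (fun m r =>
          (PySem.List.pyRange 1 (width - 1) 1).foldl
            (fun m c =>
              let gx := (pvPxl image (r-1) (c+1) + 2 * pvPxl image r (c+1) + pvPxl image (r+1) (c+1))
                      - (pvPxl image (r-1) (c-1) + 2 * pvPxl image r (c-1) + pvPxl image (r+1) (c-1))
              let gy := (pvPxl image (r-1) (c-1) + 2 * pvPxl image (r-1) c + pvPxl image (r-1) (c+1))
                      - (pvPxl image (r+1) (c-1) + 2 * pvPxl image (r+1) c + pvPxl image (r+1) (c+1))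
              let magnitude := |gx| + |gy|
              PySem.List.pySetD m (r - start_row)
                (PySem.List.pySetD (PySem.List.pyGetD m (r - start_row) []) c magnitude))
            m)
        sobel0
    (start_row, end_row, sobel)

-- ===== PORT B =====
def process_chunk_alt (args : List (List Int) × Int × Int × Int) : Int × Int × List (List Int) :=
  match args with
  | (image, width, start_row, end_row) =>
    let lo := max 1 start_row
    let hi := min end_row (PySem.List.len image - 1)
    let sobel :=
      if 3 ≤ width ∧ lo < hi then
        let vcol : List (List Int) :=
          (PySem.List.pyRange lo hi 1).map (fun r =>
            (PySem.List.pyRange 0 width 1).map (fun c =>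
              pvPxl image (r-1) c + 2 * pvPxl image r c + pvPxl image (r+1) c))
        let hrow : List (List Int) :=
          (PySem.List.pyRange (lo-1) (hi+1) 1).map (fun i =>
            (PySem.List.pyRange 1 (width-1) 1).map (fun c =>
              pvPxl image i (c-1) + 2 * pvPxl image i c + pvPxl image i (c+1)))
        (PySem.List.pyRange start_row end_row 1).map (fun r =>
          if lo ≤ r ∧ r < hi then
            [(0 : Int)] ++ ((PySem.List.pyRange 1 (width-1) 1).map (fun c =>
              |pvPxl vcol (r-lo) (c+1) - pvPxl vcol (r-lo) (c-1)|
              + |pvPxl hrow (r-lo) (c-1) - pvPxl hrow (r-lo+2) (c-1)|)) ++ [(0 : Int)]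
          else PySem.List.pyRepeat [(0 : Int)] width)
      else
        (PySem.List.pyRange 0 (end_row - start_row) 1).map
          (fun _ => PySem.List.pyRepeat [(0 : Int)] width)
    (start_row, end_row, sobel)

-- ===== PRECONDITION & SPEC =====
-- Pre_ excludes exactly the inputs on which the Python A raises IndexError:
-- when the loop body runs (nonempty row range and width >= 3), every image row
-- it touches (indices max(1,start_row)-1 .. min(end_row,len(image)-1)) must
-- have at least `width` entries.
def Pre_process_chunk (args : List (List Int) × Int × Int × Int) : Prop :=
  (max 1 args.2.2.1 < min args.2.2.2 ((args.1.length : Int) - 1) ∧ 3 ≤ args.2.1) →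
    ∀ i ∈ PySem.List.pyRange (max 1 args.2.2.1 - 1) (min args.2.2.2 ((args.1.length : Int) - 1) + 1) 1,
      args.2.1 ≤ ((args.1.getD i.toNat []).length : Int)
instance (args : List (List Int) × Int × Int × Int) : Decidable (Pre_process_chunk args) := by
  unfold Pre_process_chunk; infer_instance

def pvWitness_process_chunk : (List (List Int) × Int × Int × Int) :=
  ([[1,2,3],[4,5,6],[7,8,9]], 3, 0, 3)

def Spec_process_chunk (args : List (List Int) × Int × Int × Int) (out : Int × Int × List (List Int)) : Prop := out = process_chunk_alt args
instance (args : List (List Int) × Int × Int × Int) (out : Int × Int × List (List Int)) : Decidable (Spec_process_chunk args out) := by unfold Spec_process_chunk; infer_instance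

-- ===== CLAIM (what is proved, stated in full; the proofs are below) =====
def Claim_equal_process_chunk : Prop := ∀ (args : List (List Int) × Int × Int × Int), Dom_process_chunk args → Pre_process_chunk args → Spec_process_chunk args (process_chunk args)



-- ===== LEMMAS AND PROOFS =====

-- reading back the cell just written
lemma pvGetSet {α : Type} (xs : List α) (i : Int) (v d : α)
    (h0 : 0 ≤ i) (h1 : i < (xs.length : Int)) :
    PySem.List.pyGetD (PySem.List.pySetD xs i v) i d = v := by
  rw [show i = (((i.toNat : ℕ)) : Int) from by omega,
      PySem.List.pyGetD_pySetD_natCast xs i.toNat i.toNat v d (by omega), if_pos rfl]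

-- overwriting the same cell twice
lemma pvSetSet {α : Type} (xs : List α) (i : Int) (v w : α) (h0 : 0 ≤ i) :
    PySem.List.pySetD (PySem.List.pySetD xs i v) i w = PySem.List.pySetD xs i w := by
  rw [PySem.List.pySetD_of_nonneg xs v h0, PySem.List.pySetD_of_nonneg _ w h0,
      PySem.List.pySetD_of_nonneg xs w h0, List.set_set]

-- A's inner c-loop mutates one fixed row of the matrix: it equals writing the
-- folded row back once
lemma pvCollapse {i : Int} (g : Int → Int) (h0 : 0 ≤ i) :
    ∀ (cs : List Int) (m : List (List Int)), i < (m.length : Int) →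
      cs.foldl (fun m c => PySem.List.pySetD m i
          (PySem.List.pySetD (PySem.List.pyGetD m i []) c (g c))) m
      = PySem.List.pySetD m i
          (cs.foldl (fun p c => PySem.List.pySetD p c (g c)) (PySem.List.pyGetD m i [])) := by
  intro cs
  induction cs with
  | nil =>
    intro m hm
    rw [List.foldl_nil, PySem.List.pySetD_of_nonneg _ _ h0,
        List.foldl_nil, PySem.List.pyGetD_eq_getElem _ _ h0 hm]
    have hi2 : i.toNat < m.length := by omega
    exact (List.set_getElem_self hi2).symm
  | cons c cs ih =>
    intro m hm
    rw [List.foldl_cons, List.foldl_cons,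
        ih _ (by rw [PySem.List.length_pySetD]; exact hm),
        pvGetSet _ _ _ _ h0 hm, pvSetSet _ _ _ _ h0]

-- cell-level description of the row fold (writes g c at cells a ≤ c < b)
lemma pvSetFoldGet (g : Int → Int) (b : Int) :
    ∀ (n : ℕ) (a : Int), (b - a).toNat = n → 0 ≤ a →
    ∀ (row : List Int) (j : ℕ),
      ((PySem.List.pyRange a b 1).foldl (fun p c => PySem.List.pySetD p c (g c)) row)[j]? =
      if a ≤ (j : Int) ∧ (j : Int) < b ∧ j < row.length then some (g j) else row[j]? := by
  intro n
  induction n with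
  | zero =>
    intro a hn _ row j
    rw [PySem.List.pyRange_one_eq_nil (a := a) (b := b) (by omega), List.foldl_nil,
        if_neg (by omega)]
  | succ k ih =>
    intro a hn ha row j
    rw [PySem.List.pyRange_one_cons (a := a) (b := b) (show a < b by omega), List.foldl_cons,
        PySem.List.pySetD_of_nonneg _ _ ha,
        ih (a+1) (by omega) (by omega), List.length_set]
    by_cases h1 : (a+1 : Int) ≤ (j : Int) ∧ (j : Int) < b ∧ j < row.length
    · rw [if_pos h1, if_pos (by omega)]
    · rw [if_neg h1, List.getElem?_set]
      by_cases hja : (j : Int) = a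
      · rw [hja]
        by_cases h3 : j < row.length
        · rw [if_pos (show a.toNat = j by omega), if_pos (show a.toNat < row.length by omega),
              if_pos (by omega)]
        · rw [if_pos (show a.toNat = j by omega), if_neg (show ¬ a.toNat < row.length by omega),
              if_neg (by omega)]
          exact (List.getElem?_eq_none (by omega)).symm
      · rw [if_neg (show ¬ a.toNat = j by omega), if_neg (by omega)]

-- matrix-level description of A's double loop
lemma pvMatFoldGet (s width : Int) (mag : Int → Int → Int) :
    ∀ (n : ℕ) (a b : Int), (b - a).toNat = n → s ≤ a →
    ∀ (m : List (List Int)) (j : ℕ), b ≤ s + (m.length : Int) →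
      ((PySem.List.pyRange a b 1).foldl
        (fun m r => (PySem.List.pyRange 1 (width-1) 1).foldl
          (fun m c => PySem.List.pySetD m (r - s)
            (PySem.List.pySetD (PySem.List.pyGetD m (r - s) []) c (mag r c))) m) m)[j]? =
      if a ≤ s + (j : Int) ∧ s + (j : Int) < b
      then some ((PySem.List.pyRange 1 (width-1) 1).foldl
             (fun p c => PySem.List.pySetD p c (mag (s + (j : Int)) c)) (m.getD j []))
      else m[j]? := by
  intro n
  induction n with
  | zero =>
    intro a b hn hsa m j hb
    rw [PySem.List.pyRange_one_eq_nil (a := a) (b := b) (by omega), List.foldl_nil,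
        if_neg (by omega)]
  | succ k ih =>
    intro a b hn hsa m j hb
    rw [PySem.List.pyRange_one_cons (a := a) (b := b) (show a < b by omega), List.foldl_cons,
        pvCollapse (mag a) (show (0:Int) ≤ a - s by omega)
          (PySem.List.pyRange 1 (width-1) 1) m (by omega)]
    set R := (PySem.List.pyRange 1 (width-1) 1).foldl
      (fun p c => PySem.List.pySetD p c (mag a c)) (PySem.List.pyGetD m (a - s) []) with hR
    have hlen : (PySem.List.pySetD m (a - s) R).length = m.length :=
      PySem.List.length_pySetD _ _ _
    rw [ih (a+1) b (by omega) (by omega) (PySem.List.pySetD m (a - s) R) j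
        (by rw [hlen]; omega)]
    rw [PySem.List.pySetD_of_nonneg m R (by omega)]
    by_cases hje : s + (j : Int) = a
    · rw [if_neg (by omega), if_pos (by omega), List.getElem?_set,
          if_pos (show (a - s).toNat = j by omega), if_pos (by omega), hR]
      rw [show PySem.List.pyGetD m (a - s) [] = m.getD j [] from by
            rw [show (a - s) = ((j : ℕ) : Int) from by omega, PySem.List.pyGetD_natCast],
          show (s + (j : Int)) = a from hje]
    · rw [List.getElem?_set, if_neg (show ¬ (a - s).toNat = j by omega)]
      by_cases hcnd : a + 1 ≤ s + (j : Int) ∧ s + (j : Int) < b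
      · rw [if_pos hcnd, if_pos (by omega),
            show (m.set (a - s).toNat R).getD j [] = m.getD j [] from by
              rw [List.getD_eq_getElem?_getD, List.getD_eq_getElem?_getD,
                  List.getElem?_set, if_neg (by omega)]]
      · rw [if_neg hcnd, if_neg (by omega)]

-- indexing 0 :: (L ++ [0])
lemma pvConsAppGet (L : List Int) (j : ℕ) :
    ((0 : Int) :: (L ++ [0]))[j]? =
    if j = 0 then some 0 else if j - 1 < L.length then L[j-1]?
    else if j = L.length + 1 then some 0 else none := by
  cases j with
  | zero => rw [List.getElem?_cons_zero, if_pos rfl]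
  | succ j' =>
    rw [List.getElem?_cons_succ, List.getElem?_append, if_neg (show ¬ (j' + 1 = 0) by omega),
        Nat.add_sub_cancel]
    by_cases h : j' < L.length
    · rw [if_pos h, if_pos h]
    · rw [if_neg h, if_neg h]
      by_cases h2 : j' = L.length
      · rw [if_pos (by omega), show j' - L.length = 0 from by omega, List.getElem?_cons_zero]
      · rw [if_neg (by omega), show j' - L.length = (j' - L.length - 1) + 1 from by omega,
            List.getElem?_cons_succ, List.getElem?_nil]

-- the row fold on a zero row builds [0] ++ interior ++ [0]
lemma pvRowEq (g : Int → Int) (width : Int) (hw : 3 ≤ width) :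
    (PySem.List.pyRange 1 (width-1) 1).foldl
        (fun p c => PySem.List.pySetD p c (g c)) (PySem.List.pyRepeat [(0 : Int)] width)
    = [(0 : Int)] ++ (PySem.List.pyRange 1 (width-1) 1).map g ++ [(0 : Int)] := by
  apply List.ext_getElem?
  intro j
  rw [pvSetFoldGet g (width-1) (width-1-1).toNat 1 rfl (by omega),
      PySem.List.pyRepeat_singleton, List.length_replicate,
      show [(0 : Int)] ++ (PySem.List.pyRange 1 (width-1) 1).map g ++ [(0 : Int)]
         = (0 : Int) :: ((PySem.List.pyRange 1 (width-1) 1).map g ++ [0]) from by simp,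
      pvConsAppGet, List.length_map, PySem.List.length_pyRange_one,
      List.getElem?_replicate, List.getElem?_map, PySem.List.getElem?_pyRange_one]
  by_cases h0 : j = 0
  · rw [if_pos h0, if_neg (by omega), if_pos (by omega)]
  · rw [if_neg h0]
    by_cases hmid : 1 ≤ (j : Int) ∧ (j : Int) < width - 1
    · rw [if_pos (by omega),
          if_pos (show j - 1 < (width - 1 - 1).toNat by omega),
          if_pos (show j - 1 < (width - 1 - 1).toNat by omega)]
      simp only [Option.map_some]
      refine congrArg some (congrArg g ?_)
      omega
    · rw [if_neg (by omega)]
      by_cases hend : j = (width - 1 - 1).toNat + 1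
      · rw [if_pos (show j < width.toNat by omega),
            if_neg (show ¬ j - 1 < (width - 1 - 1).toNat by omega), if_pos hend]
      · by_cases hbig : j < width.toNat
        · exfalso; omega
        · rw [if_neg hbig, if_neg (show ¬ j - 1 < (width - 1 - 1).toNat by omega), if_neg hend]

-- indexing a comprehension over range(a, b) at offset i - a
lemma pvGetMapRange {α : Type} (f : Int → α) (a b i : Int) (d : α)
    (h1 : a ≤ i) (h2 : i < b) :
    PySem.List.pyGetD ((PySem.List.pyRange a b 1).map f) (i - a) d = f i := by
  rw [show (i - a) = (((i - a).toNat : ℕ) : Int) from by omega,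
      PySem.List.pyGetD_map_pyRange_one f a b (i - a).toNat d (by omega)]
  congr 1
  omega

-- indexing a comprehension over a constant
lemma pvGetDConstMap {α : Type} (l : List Int) (v d : α) (j : ℕ) (h : j < l.length) :
    (l.map (fun _ => v)).getD j d = v := by
  rw [List.getD_eq_getElem?_getD, List.getElem?_map, List.getElem?_eq_getElem h]
  rfl

-- the pixel identity: B's table lookups equal A's direct Gx/Gy sums
lemma pvPixEq (image : List (List Int)) (width lo hi r c : Int)
    (hr1 : lo ≤ r) (hr2 : r < hi) (hc1 : 1 ≤ c) (hc2 : c < width - 1) :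
    |pvPxl ((PySem.List.pyRange lo hi 1).map (fun r =>
        (PySem.List.pyRange 0 width 1).map (fun c =>
          pvPxl image (r-1) c + 2 * pvPxl image r c + pvPxl image (r+1) c))) (r - lo) (c+1)
     - pvPxl ((PySem.List.pyRange lo hi 1).map (fun r =>
        (PySem.List.pyRange 0 width 1).map (fun c =>
          pvPxl image (r-1) c + 2 * pvPxl image r c + pvPxl image (r+1) c))) (r - lo) (c-1)|
    + |pvPxl ((PySem.List.pyRange (lo-1) (hi+1) 1).map (fun i =>
        (PySem.List.pyRange 1 (width-1) 1).map (fun c =>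
          pvPxl image i (c-1) + 2 * pvPxl image i c + pvPxl image i (c+1)))) (r - lo) (c-1)
     - pvPxl ((PySem.List.pyRange (lo-1) (hi+1) 1).map (fun i =>
        (PySem.List.pyRange 1 (width-1) 1).map (fun c =>
          pvPxl image i (c-1) + 2 * pvPxl image i c + pvPxl image i (c+1)))) (r - lo + 2) (c-1)|
    = |(pvPxl image (r-1) (c+1) + 2 * pvPxl image r (c+1) + pvPxl image (r+1) (c+1))
       - (pvPxl image (r-1) (c-1) + 2 * pvPxl image r (c-1) + pvPxl image (r+1) (c-1))|
    + |(pvPxl image (r-1) (c-1) + 2 * pvPxl image (r-1) c + pvPxl image (r-1) (c+1))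
       - (pvPxl image (r+1) (c-1) + 2 * pvPxl image (r+1) c + pvPxl image (r+1) (c+1))| := by
  unfold pvPxl
  rw [pvGetMapRange _ lo hi r [] hr1 hr2]
  rw [show (r - lo + 2 : Int) = (r+1) - (lo-1) from by ring]
  rw [show (r - lo : Int) = (r-1) - (lo-1) from by ring]
  rw [pvGetMapRange _ (lo-1) (hi+1) (r-1) [] (by omega) (by omega)]
  rw [pvGetMapRange _ (lo-1) (hi+1) (r+1) [] (by omega) (by omega)]
  rw [PySem.List.pyGetD_map_pyRange_of_nonneg _ width (c+1) 0 (by omega) (by omega)]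
  rw [PySem.List.pyGetD_map_pyRange_of_nonneg _ width (c-1) 0 (by omega) (by omega)]
  rw [pvGetMapRange _ 1 (width-1) c 0 hc1 hc2]
  rw [pvGetMapRange _ 1 (width-1) c 0 hc1 hc2]

-- wrapper without the fuel argument
lemma pvMatFoldGet' (s width : Int) (mag : Int → Int → Int) (a b : Int) (hsa : s ≤ a)
    (m : List (List Int)) (j : ℕ) (hb : b ≤ s + (m.length : Int)) :
    ((PySem.List.pyRange a b 1).foldl
      (fun m r => (PySem.List.pyRange 1 (width-1) 1).foldl
        (fun m c => PySem.List.pySetD m (r - s)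
          (PySem.List.pySetD (PySem.List.pyGetD m (r - s) []) c (mag r c))) m) m)[j]? =
    if a ≤ s + (j : Int) ∧ s + (j : Int) < b
    then some ((PySem.List.pyRange 1 (width-1) 1).foldl
           (fun p c => PySem.List.pySetD p c (mag (s + (j : Int)) c)) (m.getD j []))
    else m[j]? :=
  pvMatFoldGet s width mag (b - a).toNat a b rfl hsa m j hb

-- ===== VERDICT (by name: the statement is the Claim_ definition above) =====
theorem process_chunk_spec : Claim_equal_process_chunk := by
  intro args hdom hpre
  obtain ⟨image, width, s, e⟩ := args
  unfold Spec_process_chunk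
  simp only [process_chunk, process_chunk_alt, PySem.List.len_eq, Prod.mk.injEq]
  refine ⟨trivial, trivial, ?_⟩
  by_cases hc : 3 ≤ width ∧ max 1 s < min e ((image.length : Int) - 1)
  · rw [if_pos hc]
    apply List.ext_getElem?
    intro j
    rw [pvMatFoldGet' s width _ (max 1 s) (min e ((image.length : Int) - 1)) (by omega)
        (List.map (fun _ => PySem.List.pyRepeat [(0 : Int)] width)
          (PySem.List.pyRange 0 (e - s) 1)) j
        (by simp only [List.length_map, PySem.List.length_pyRange_one]; omega)]
    by_cases hin : max 1 s ≤ s + (j : Int) ∧ s + (j : Int) < min e ((image.length : Int) - 1)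
    · rw [if_pos hin]
      rw [List.getElem?_map, PySem.List.getElem?_pyRange_one,
          if_pos (show j < (e - s).toNat by omega)]
      simp only [Option.map_some]
      rw [if_pos hin]
      rw [pvGetDConstMap _ _ _ j (by simp only [PySem.List.length_pyRange_one]; omega)]
      rw [pvRowEq _ width hc.1]
      refine congrArg some
        (congrArg (· ++ [(0 : Int)]) (congrArg ([(0 : Int)] ++ ·) (List.map_congr_left ?_)))
      intro c hcm
      rw [PySem.List.mem_pyRange_one] at hcm
      exact (pvPixEq image width (max 1 s) (min e ((image.length : Int) - 1)) (s + (j : Int)) c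
        hin.1 hin.2 hcm.1 hcm.2).symm
    · rw [if_neg hin]
      rw [List.getElem?_map, PySem.List.getElem?_pyRange_one,
          List.getElem?_map, PySem.List.getElem?_pyRange_one]
      by_cases hj : j < (e - s).toNat
      · rw [if_pos (show j < (e - s - 0).toNat by omega), if_pos hj]
        simp only [Option.map_some]
        rw [if_neg hin]
      · rw [if_neg (show ¬ j < (e - s - 0).toNat by omega), if_neg hj]
        rfl
  · rw [if_neg hc]
    by_cases hlh : min e ((image.length : Int) - 1) ≤ max 1 s
    · rw [PySem.List.pyRange_one_eq_nil hlh, List.foldl_nil]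
    · simp only [PySem.List.pyRange_one_eq_nil (show (width : Int) - 1 ≤ 1 by omega),
        List.foldl_nil, List.foldl_fixed]
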